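-- pv_equiv track=rewrite | github.com/rowancape/ubongo3D_solver | test.py | generateRotations
-- ===== SOURCE A (Python) =====
-- def rotateX(object, rotations=1):
--     rotations = rotations % 4
--
--     for _ in range(rotations):
--         layers = len(object)
--         rows = len(object[0])
--         points = len(object[0][0])
--
--         rotatedObject = [
--             [[object[j][rows - 1 - i][k] for k in range(points)] for j in range(layers)]
--             for i in range(rows)
--         ]
--         object = rotatedObject
--
--     return object
--
-- def rotateY(object, rotations=1):
--     rotations = rotations % 4
--
--     for _ in range(rotations):
--         layers = len(object)
--         rows = len(object[0])
--         points = len(object[0][0])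
--
--         rotatedObject = [
--             [[object[layers - 1 - k][j][i] for k in range(layers)] for j in range(rows)]
--             for i in range(points)
--         ]
--         object = rotatedObject
--
--     return object
--
-- def rotateZ(object, rotations=1):
--     rotations = rotations % 4
--
--     for _ in range(rotations):
--         layers = len(object)
--         rows = len(object[0])
--         points = len(object[0][0])
--
--         rotatedObject = [
--             [[object[i][rows - 1 - k][j] for k in range(rows)] for j in range(points)]
--             for i in range(layers)
--         ]
--         object = rotatedObject
--
--     return object
--
-- def generateRotations(object):
--     rotations = []
--     rotationStates = []
--
--     for i in range(4):
--         for j in range(4):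
--             for k in range(4):
--                 isDuplicate = False
--                 rotatedObject = rotateX(rotateY(rotateZ(object, k), j), i)
--                 rotations.append(rotatedObject)
--                 rotationStates.append([i, j, k])
--     return rotations
-- ===== SOURCE B (Python) =====
-- def generateRotations(object):
--     # Incremental rotation cache: each of the 63 non-identity orientations is
--     # obtained by ONE quarter-turn from an already computed one, instead of
--     # re-rotating from scratch for every (i, j, k).
--     def stepX(o):
--         L, R, P = len(o), len(o[0]), len(o[0][0])
--         return [[[o[j][R - 1 - i][k] for k in range(P)] for j in range(L)] for i in range(R)]
--
--     def stepY(o):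
--         L, R, P = len(o), len(o[0]), len(o[0][0])
--         return [[[o[L - 1 - k][j][i] for k in range(L)] for j in range(R)] for i in range(P)]
--
--     def stepZ(o):
--         L, R, P = len(o), len(o[0]), len(o[0][0])
--         return [[[o[i][R - 1 - k][j] for k in range(R)] for j in range(P)] for i in range(L)]
--
--     # zRow[k] = object rotated k quarter-turns about Z (zRow[0] is object itself)
--     zRow = [object]
--     z = object
--     for _ in range(3):
--         z = stepZ(z)
--         zRow.append(z)
--
--     # yGrid[j][k] = stepY^j applied to zRow[k]
--     yGrid = [zRow]
--     g = zRow
--     for _ in range(3):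
--         g = [stepY(o) for o in g]
--         yGrid.append(g)
--
--     # emit in i-major, then j, then k order; advance the whole grid by one X step
--     out = []
--     grid = yGrid
--     for i in range(4):
--         for row in grid:
--             out += row
--         if i < 3:
--             grid = [[stepX(o) for o in row] for row in grid]
--     return out
-- ===== Notes on version B (the rewrite author's own statement) =====
-- stated objective: faster
-- what changed: B replaces A's recompute-from-scratch triple loop (rotateX(rotateY(rotateZ(object,k),j),i), i+j+k quarter-turns each) by incremental caches: 4 Z states, a 4x4 Y grid, then the whole grid advanced one X quarter-turn per outer i, so every orientation costs one quarter-turn.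
import Mathlib
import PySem

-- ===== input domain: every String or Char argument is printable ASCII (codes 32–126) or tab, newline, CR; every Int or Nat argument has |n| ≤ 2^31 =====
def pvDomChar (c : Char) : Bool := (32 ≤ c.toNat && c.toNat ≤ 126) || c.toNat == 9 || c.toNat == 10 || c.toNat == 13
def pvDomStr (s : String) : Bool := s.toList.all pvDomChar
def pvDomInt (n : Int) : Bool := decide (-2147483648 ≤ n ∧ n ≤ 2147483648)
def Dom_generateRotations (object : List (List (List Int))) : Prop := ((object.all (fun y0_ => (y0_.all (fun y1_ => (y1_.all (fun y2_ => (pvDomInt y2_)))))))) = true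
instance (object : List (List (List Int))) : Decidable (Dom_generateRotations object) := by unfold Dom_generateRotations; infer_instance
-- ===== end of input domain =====

-- B caches quarter-turns incrementally (78 quarter-turn applications instead of A's 288);
-- equal output list, same order; neither program mutates its argument.

-- ===== PORT A =====
-- one quarter-turn about X: the body of rotateX's loop.  List.getD only hits its
-- default where the Python indexing would raise, which Pre_ excludes.
def pvAStepX (o : List (List (List Int))) : List (List (List Int)) :=
  let layers := o.length
  let rows := (o.headI).length
  let points := ((o.headI).headI).length
  (List.range rows).map (fun i => (List.range layers).map (fun j =>
    (List.range points).map (fun k => ((o.getD j []).getD (rows - 1 - i) []).getD k 0)))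

def pvAStepY (o : List (List (List Int))) : List (List (List Int)) :=
  let layers := o.length
  let rows := (o.headI).length
  let points := ((o.headI).headI).length
  (List.range points).map (fun i => (List.range rows).map (fun j =>
    (List.range layers).map (fun k => ((o.getD (layers - 1 - k) []).getD j []).getD i 0)))

def pvAStepZ (o : List (List (List Int))) : List (List (List Int)) :=
  let layers := o.length
  let rows := (o.headI).length
  let points := ((o.headI).headI).length
  (List.range layers).map (fun i => (List.range points).map (fun j =>
    (List.range rows).map (fun k => ((o.getD i []).getD (rows - 1 - k) []).getD j 0)))

-- rotateX(object, n): n % 4 iterations of the loop body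
def pvRotX (o : List (List (List Int))) (n : Int) : List (List (List Int)) :=
  (List.range (PySem.Int.mod n 4).toNat).foldl (fun acc _ => pvAStepX acc) o

def pvRotY (o : List (List (List Int))) (n : Int) : List (List (List Int)) :=
  (List.range (PySem.Int.mod n 4).toNat).foldl (fun acc _ => pvAStepY acc) o

def pvRotZ (o : List (List (List Int))) (n : Int) : List (List (List Int)) :=
  (List.range (PySem.Int.mod n 4).toNat).foldl (fun acc _ => pvAStepZ acc) o

-- rotationStates / isDuplicate are dead in A (never read, not returned); only rotations is ported.
def generateRotations (object : List (List (List Int))) : List (List (List (List Int))) :=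
  (PySem.List.pyRange 0 4 1).foldl (fun acc i =>
    (PySem.List.pyRange 0 4 1).foldl (fun acc j =>
      (PySem.List.pyRange 0 4 1).foldl (fun acc k =>
        acc ++ [pvRotX (pvRotY (pvRotZ object k) j) i]) acc) acc) []

-- ===== PORT B =====
def pvBStepX (o : List (List (List Int))) : List (List (List Int)) :=
  let layers := o.length
  let rows := (o.headI).length
  let points := ((o.headI).headI).length
  (List.range rows).map (fun i => (List.range layers).map (fun j =>
    (List.range points).map (fun k => ((o.getD j []).getD (rows - 1 - i) []).getD k 0)))

def pvBStepY (o : List (List (List Int))) : List (List (List Int)) :=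
  let layers := o.length
  let rows := (o.headI).length
  let points := ((o.headI).headI).length
  (List.range points).map (fun i => (List.range rows).map (fun j =>
    (List.range layers).map (fun k => ((o.getD (layers - 1 - k) []).getD j []).getD i 0)))

def pvBStepZ (o : List (List (List Int))) : List (List (List Int)) :=
  let layers := o.length
  let rows := (o.headI).length
  let points := ((o.headI).headI).length
  (List.range layers).map (fun i => (List.range points).map (fun j =>
    (List.range rows).map (fun k => ((o.getD i []).getD (rows - 1 - k) []).getD j 0)))

def generateRotations_alt (object : List (List (List Int))) : List (List (List (List Int))) :=
  -- zRow[k] = object after k quarter-turns about Z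
  let zr := (List.range 3).foldl
    (fun (s : List (List (List (List Int))) × List (List (List Int))) _ =>
      let z := pvBStepZ s.2; (s.1 ++ [z], z)) ([object], object)
  let zRow := zr.1
  -- yGrid[j][k] = stepY^j (zRow[k])
  let yg := (List.range 3).foldl
    (fun (s : List (List (List (List (List Int)))) × List (List (List (List Int)))) _ =>
      let g := s.2.map pvBStepY; (s.1 ++ [g], g)) ([zRow], zRow)
  let yGrid := yg.1
  -- emit in i-major / j / k order; advance the whole grid by one X step between i's
  ((List.range 4).foldl
    (fun (s : List (List (List (List Int))) × List (List (List (List (List Int))))) i =>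
      let out := s.2.foldl (fun o row => o ++ row) s.1
      let grid := if i < 3 then s.2.map (fun row => row.map pvBStepX) else s.2
      (out, grid)) ([], yGrid)).1

-- ===== PRECONDITION & SPEC =====
-- Pre_ is exactly the set of inputs on which the Python A returns: A raises IndexError
-- unless the object is nonempty, its first row nonempty, and (with R = len(object[0]),
-- P = len(object[0][0])) every layer has at least R rows whose first R rows each have at
-- least P entries -- after one quarter-turn the object is rebuilt rectangular, so only the
-- very first step of each axis can raise.
def Pre_generateRotations (object : List (List (List Int))) : Prop :=
  object ≠ [] ∧ object.headI ≠ [] ∧ (object.headI).headI ≠ [] ∧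
    ∀ l ∈ object, (object.headI).length ≤ l.length ∧
      ∀ r ∈ l.take (object.headI).length, ((object.headI).headI).length ≤ r.length
instance (object : List (List (List Int))) : Decidable (Pre_generateRotations object) := by
  unfold Pre_generateRotations; infer_instance

def pvWitness_generateRotations : List (List (List Int)) := [[[1, 2], [3, 4]], [[5, 6], [7, 8]]]

def Spec_generateRotations (object : List (List (List Int))) (out : List (List (List (List Int)))) : Prop := out = generateRotations_alt object
instance (object : List (List (List Int))) (out : List (List (List (List Int)))) : Decidable (Spec_generateRotations object out) := by unfold Spec_generateRotations; infer_instance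

-- ===== CLAIM (what is proved, stated in full; the proofs are below) =====
def Claim_equal_generateRotations : Prop := ∀ (object : List (List (List Int))), Dom_generateRotations object → Pre_generateRotations object → Spec_generateRotations object (generateRotations object)

-- ===== LEMMAS AND PROOFS =====

-- ===== VERDICT (by name: the statement is the Claim_ definition above) =====
theorem generateRotations_spec : Claim_equal_generateRotations := by
  intro o _ _
  unfold Spec_generateRotations
  have hx : pvBStepX = pvAStepX := rfl
  have hy : pvBStepY = pvAStepY := rfl
  have hz : pvBStepZ = pvAStepZ := rfl
  simp only [generateRotations, generateRotations_alt, pvRotX, pvRotY, pvRotZ, hx, hy, hz,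
    show PySem.List.pyRange 0 4 1 = [0, 1, 2, 3] from rfl,
    show (PySem.Int.mod 0 4).toNat = 0 from rfl,
    show (PySem.Int.mod 1 4).toNat = 1 from rfl,
    show (PySem.Int.mod 2 4).toNat = 2 from rfl,
    show (PySem.Int.mod 3 4).toNat = 3 from rfl,
    show List.range 0 = [] from rfl,
    show List.range 1 = [0] from rfl,
    show List.range 2 = [0, 1] from rfl,
    show List.range 3 = [0, 1, 2] from rfl,
    show List.range 4 = [0, 1, 2, 3] from rfl,
    List.foldl_cons, List.foldl_nil, List.map_cons, List.map_nil,
    List.append_assoc, List.nil_append, List.cons_append]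
  norm_num [List.foldl_cons, List.foldl_nil, List.append_assoc]
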